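-- pv_equiv track=rewrite | github.com/AugustoKark/ListaDiccionario | test_ListaDiccionario.py | Buscar_Repetidos
-- ===== SOURCE A (Python) =====
-- def Buscar_Repetidos(lista):
--
--     resultado={}
--
--
--     for i in range(len(lista)):
--         for j in range(i+1,len(lista)):
--             if lista[i]>lista[j]:
--                 ac=lista[i]
--                 lista[i]=lista[j]
--                 lista[j]=ac
--
--     for elem in lista:
--
--
--         if elem not in resultado:
--
--             resultado[elem]=1
--         else:
--             resultado[elem]+=1
--     return resultado
-- ===== SOURCE B (Python) =====
-- def Buscar_Repetidos(lista):
--     # Sort in place (same observable side effect as the original's swap loops),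
--     # then count equal runs by adjacency instead of a dict lookup per element.
--     lista.sort()
--     resultado = {}
--     resto = lista
--     while resto:
--         x = resto[0]
--         k = 1
--         while k < len(resto) and resto[k] == x:
--             k += 1
--         resultado[x] = k
--         resto = resto[k:]
--     return resultado
-- ===== Notes on version B (the rewrite author's own statement) =====
-- stated objective: faster
-- what changed: Replaces the O(n^2) nested swap loops with the built-in in-place sort and replaces the per-element dict-membership counting with adjacency-based run-length counting over the sorted list.
import Mathlib
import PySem

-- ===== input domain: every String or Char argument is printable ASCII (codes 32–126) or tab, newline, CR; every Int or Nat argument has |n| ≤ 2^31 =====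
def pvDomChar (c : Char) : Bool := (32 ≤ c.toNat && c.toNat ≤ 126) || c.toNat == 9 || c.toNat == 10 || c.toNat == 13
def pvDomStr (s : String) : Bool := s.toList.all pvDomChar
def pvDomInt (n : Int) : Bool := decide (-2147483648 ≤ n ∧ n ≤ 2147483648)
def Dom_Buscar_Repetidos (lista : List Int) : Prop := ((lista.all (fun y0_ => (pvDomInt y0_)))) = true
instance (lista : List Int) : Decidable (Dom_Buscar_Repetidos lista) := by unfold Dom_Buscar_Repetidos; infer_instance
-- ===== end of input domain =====

-- B replaces A's O(n^2) nested swap loops by the built-in sort plus adjacency run-length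
-- counting (objective: faster). Both Pythons sort `lista` in place (the same side effect);
-- the equivalence proved here is about the return value.

-- ===== PORT A =====
-- inner swap step: `if lista[i] > lista[j]: ac=lista[i]; lista[i]=lista[j]; lista[j]=ac`
-- (both reads happen before the writes, as in A)
def pvSwap (i : Nat) (l : List Int) (j : Nat) : List Int :=
  if l.getD i 0 > l.getD j 0 then (l.set i (l.getD j 0)).set j (l.getD i 0) else l

-- `for j in range(i+1, len(lista))`
def pvInner (n : Nat) (l : List Int) (i : Nat) : List Int :=
  (List.range' (i + 1) (n - (i + 1))).foldl (pvSwap i) l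

-- `for i in range(len(lista))` (the length is invariant under the swaps)
def pvASort (l : List Int) : List Int :=
  (List.range l.length).foldl (pvInner l.length) l

-- `if elem not in resultado: resultado[elem]=1 else: resultado[elem]+=1`
def pvCountStep (d : PySem.Dict Int Int) (e : Int) : PySem.Dict Int Int :=
  if d.contains e = false then d.insert e 1 else d.insert e (d.getD e 0 + 1)

def Buscar_Repetidos (lista : List Int) : List (Int × Int) :=
  ((pvASort lista).foldl pvCountStep PySem.Dict.empty).items

-- ===== PORT B =====
-- the outer `while resto:` loop of Source B: the inner `while` counts the equal prefix
-- (takeWhile) and `resto[k:]` drops it (dropWhile); `resultado[x] = k` always inserts a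
-- fresh key (runs of a sorted list have distinct heads), so the dict is exactly this pair
-- list in insertion order.
def pvRuns : List Int → List (Int × Int)
  | [] => []
  | x :: xs =>
      (x, (1 : Int) + (xs.takeWhile (· == x)).length) :: pvRuns (xs.dropWhile (· == x))
  termination_by l => l.length
  decreasing_by
    simpa using Nat.lt_succ_of_le (List.Sublist.length_le (List.dropWhile_sublist _))

def Buscar_Repetidos_alt (lista : List Int) : List (Int × Int) :=
  pvRuns (PySem.List.sorted lista (fun x => x) false)

-- ===== PRECONDITION & SPEC =====
def Spec_Buscar_Repetidos (lista : List Int) (out : List (Int × Int)) : Prop := out = Buscar_Repetidos_alt lista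
instance (lista : List Int) (out : List (Int × Int)) : Decidable (Spec_Buscar_Repetidos lista out) := by unfold Spec_Buscar_Repetidos; infer_instance

-- ===== CLAIM (what is proved, stated in full; the proofs are below) =====
def Claim_equal_Buscar_Repetidos : Prop := ∀ (lista : List Int), Dom_Buscar_Repetidos lista → Spec_Buscar_Repetidos lista (Buscar_Repetidos lista)

-- ===== LEMMAS AND PROOFS =====

-- selection of the minimum: one inner pass of A, in functional form
def pvSel (h : Int) : List Int → Int × List Int
  | [] => (h, [])
  | y :: ys =>
      if h > y then ((pvSel y ys).1, h :: (pvSel y ys).2)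
      else ((pvSel h ys).1, y :: (pvSel h ys).2)

theorem pvSel_length (h : Int) (s : List Int) : (pvSel h s).2.length = s.length := by
  induction s generalizing h with
  | nil => rfl
  | cons y ys ih => by_cases hc : h > y <;> simp [pvSel, hc, ih]

def pvSelSort : List Int → List Int
  | [] => []
  | h :: t => (pvSel h t).1 :: pvSelSort (pvSel h t).2
  termination_by l => l.length
  decreasing_by simp [pvSel_length]

theorem pvSel_perm (h : Int) (s : List Int) :
    ((pvSel h s).1 :: (pvSel h s).2).Perm (h :: s) := by
  induction s generalizing h with
  | nil => rfl
  | cons y ys ih =>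
    by_cases hc : h > y
    · simp only [pvSel, hc, if_pos]
      exact (List.Perm.swap _ _ _).trans ((ih y).cons h)
    · simp only [pvSel, hc, ite_false]
      exact (List.Perm.swap _ _ _).trans (((ih h).cons y).trans (List.Perm.swap _ _ _))

theorem pvSel_min (h : Int) (s : List Int) :
    (pvSel h s).1 ≤ h ∧ ∀ y ∈ (pvSel h s).2, (pvSel h s).1 ≤ y := by
  induction s generalizing h with
  | nil => exact ⟨le_refl h, by simp [pvSel]⟩
  | cons y ys ih =>
    by_cases hc : h > y
    · obtain ⟨h1, h2⟩ := ih y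
      simp only [pvSel, hc, if_pos]
      refine ⟨h1.trans hc.le, ?_⟩
      intro z hz
      rcases List.mem_cons.1 hz with rfl | hz
      · exact h1.trans hc.le
      · exact h2 z hz
    · obtain ⟨h1, h2⟩ := ih h
      simp only [pvSel, hc, ite_false]
      refine ⟨h1, ?_⟩
      intro z hz
      rcases List.mem_cons.1 hz with rfl | hz
      · exact h1.trans (not_lt.1 hc)
      · exact h2 z hz

theorem pvSelSort_perm (l : List Int) : (pvSelSort l).Perm l := by
  induction l using pvSelSort.induct with
  | case1 => rw [pvSelSort]
  | case2 h t ih =>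
    rw [pvSelSort]
    exact (ih.cons _).trans (pvSel_perm h t)

theorem pvSelSort_pairwise (l : List Int) : (pvSelSort l).Pairwise (· ≤ ·) := by
  induction l using pvSelSort.induct with
  | case1 => rw [pvSelSort]; exact List.Pairwise.nil
  | case2 h t ih =>
    rw [pvSelSort]
    refine List.Pairwise.cons ?_ ih
    intro z hz
    exact (pvSel_min h t).2 z ((pvSelSort_perm _).mem_iff.1 hz)

-- positional reads/writes at a known offset
theorem pvGetD_mid (pre m : List Int) (h : Int) : (pre ++ h :: m).getD pre.length 0 = h := by
  induction pre with
  | nil => rfl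
  | cons a pre ih => simpa using ih

theorem pvSet_mid (pre m : List Int) (h v : Int) :
    (pre ++ h :: m).set pre.length v = pre ++ v :: m := by
  induction pre with
  | nil => rfl
  | cons a pre ih => simp [ih]

-- one inner pass of A, from position pre.length, having already scanned `done`
theorem pvInner_go (ys : List Int) (pre done : List Int) (h : Int) :
    (List.range' (pre.length + done.length + 1) ys.length).foldl (pvSwap pre.length)
        (pre ++ h :: (done ++ ys)) =
      pre ++ (pvSel h ys).1 :: (done ++ (pvSel h ys).2) := by
  induction ys generalizing done h with
  | nil => simp [pvSel]
  | cons y ys ih =>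
    rw [List.length_cons, List.range'_succ, List.foldl_cons]
    have hgi : (pre ++ h :: (done ++ y :: ys)).getD pre.length 0 = h := pvGetD_mid _ _ _
    have hgj : (pre ++ h :: (done ++ y :: ys)).getD (pre.length + done.length + 1) 0 = y := by
      have := pvGetD_mid (pre ++ h :: done) ys y
      simpa [List.length_append, Nat.add_comm, Nat.add_left_comm, Nat.add_assoc] using this
    by_cases hc : h > y
    · have hswap : pvSwap pre.length (pre ++ h :: (done ++ y :: ys))
          (pre.length + done.length + 1) = pre ++ y :: (done ++ h :: ys) := by
        unfold pvSwap
        rw [hgi, hgj, if_pos hc, pvSet_mid pre (done ++ y :: ys) h y]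
        have := pvSet_mid (pre ++ y :: done) ys y h
        simpa [List.length_append, Nat.add_comm, Nat.add_left_comm, Nat.add_assoc] using this
      rw [hswap]
      have := ih (done ++ [h]) y
      simp only [List.length_append, List.length_cons, List.length_nil, List.append_assoc,
        List.singleton_append] at this
      rw [show pre.length + (done.length + (0 + 1)) + 1 = pre.length + done.length + 1 + 1 by omega] at this
      rw [this]
      simp [pvSel, hc]
    · have hswap : pvSwap pre.length (pre ++ h :: (done ++ y :: ys))
          (pre.length + done.length + 1) = pre ++ h :: (done ++ y :: ys) := by
        unfold pvSwap
        rw [hgi, hgj, if_neg hc]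
      rw [hswap]
      have := ih (done ++ [y]) h
      simp only [List.length_append, List.length_cons, List.length_nil, List.append_assoc,
        List.singleton_append] at this
      rw [show pre.length + (done.length + (0 + 1)) + 1 = pre.length + done.length + 1 + 1 by omega] at this
      rw [this]
      simp [pvSel, hc]

-- the inner pass as A invokes it
theorem pvInner_spec (pre rest : List Int) (h : Int) :
    pvInner (pre.length + 1 + rest.length) (pre ++ h :: rest) pre.length =
      pre ++ (pvSel h rest).1 :: (pvSel h rest).2 := by
  have := pvInner_go rest pre [] h
  simp only [List.length_nil, List.nil_append, Nat.add_zero] at this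
  unfold pvInner
  have harg : pre.length + 1 + rest.length - (pre.length + 1) = rest.length := by omega
  rw [harg]
  exact this

-- the outer loop: processed prefix `pre` stays, the remainder gets selection-sorted
theorem pvOuter_go (m : Nat) (rest pre : List Int) (hm : rest.length = m) :
    (List.range' pre.length m).foldl (pvInner (pre.length + m)) (pre ++ rest) =
      pre ++ pvSelSort rest := by
  induction m generalizing rest pre with
  | zero =>
    rcases List.length_eq_zero_iff.1 hm with rfl
    simp [pvSelSort]
  | succ m ih =>
    rcases rest with _ | ⟨h, t⟩
    · simp at hm
    · have htl : t.length = m := by simpa using hm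
      rw [List.range'_succ, List.foldl_cons]
      have hfirst : pvInner (pre.length + (m + 1)) (pre ++ h :: t) pre.length =
          pre ++ (pvSel h t).1 :: (pvSel h t).2 := by
        have := pvInner_spec pre t h
        have harg : pre.length + 1 + t.length = pre.length + (m + 1) := by omega
        rwa [harg] at this
      rw [hfirst]
      have hlen2 : (pvSel h t).2.length = m := by rw [pvSel_length]; exact htl
      have := ih (pvSel h t).2 (pre ++ [(pvSel h t).1]) hlen2
      simp only [List.length_append, List.length_cons, List.length_nil, List.append_assoc,
        List.singleton_append] at this
      have harg2 : pre.length + (m + 1) = pre.length + (0 + 1) + m := by omega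
      rw [harg2, this, pvSelSort]

-- A's nested index loops compute pvSelSort
theorem pvASort_eq (l : List Int) : pvASort l = pvSelSort l := by
  unfold pvASort
  have := pvOuter_go l.length l [] rfl
  simpa [List.range_eq_range'] using this

-- counting a run of copies of x just bumps the single entry
theorem countH (t : List Int) (x : Int) (c : Int) (ht : ∀ e ∈ t, e = x) :
    t.foldl pvCountStep (PySem.Dict.mk [(x, c)]) = PySem.Dict.mk [(x, c + t.length)] := by
  induction t generalizing c with
  | nil => simp
  | cons e t ih =>
    have he : e = x := ht e (List.mem_cons_self)
    subst he
    have hstep : pvCountStep (PySem.Dict.mk [(e, c)]) e = PySem.Dict.mk [(e, c + 1)] := by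
      apply PySem.Dict.ext
      simp [pvCountStep, PySem.Dict.items_insert_of_contains, PySem.Dict.getD, PySem.Dict.get?]
    rw [List.foldl_cons, hstep, ih _ (fun z hz => ht z (List.mem_cons_of_mem _ hz))]
    apply PySem.Dict.ext
    simp
    ring

-- an entry whose key never recurs is left in place; later activity appends after it
theorem countI (r : List Int) (x : Int) (c : Int) (d' : PySem.Dict Int Int) (hx : x ∉ r) :
    r.foldl pvCountStep (PySem.Dict.mk ((x, c) :: d'.items)) =
      PySem.Dict.mk ((x, c) :: (r.foldl pvCountStep d').items) := by
  induction r generalizing d' with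
  | nil => apply PySem.Dict.ext; simp
  | cons e r ih =>
    have hex : e ≠ x := fun h => hx (h ▸ List.mem_cons_self)
    have hxr : x ∉ r := fun h => hx (List.mem_cons_of_mem _ h)
    have hcont : (PySem.Dict.mk ((x, c) :: d'.items)).contains e = d'.contains e := by
      simp [PySem.Dict.contains, Ne.symm hex]
    have hget : (PySem.Dict.mk ((x, c) :: d'.items)).getD e 0 = d'.getD e 0 := by
      simp [PySem.Dict.getD, PySem.Dict.get?_mk_cons, Ne.symm hex]
    have hstep : pvCountStep (PySem.Dict.mk ((x, c) :: d'.items)) e =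
        PySem.Dict.mk ((x, c) :: (pvCountStep d' e).items) := by
      unfold pvCountStep
      rw [hcont, hget]
      by_cases hc : d'.contains e = false
      · rw [if_pos hc, if_pos hc]
        apply PySem.Dict.ext
        rw [PySem.Dict.items_insert_of_not_contains _ _ (hcont.trans hc),
            PySem.Dict.items_insert_of_not_contains _ _ hc]
        simp
      · have hc' : d'.contains e = true := by simpa using hc
        rw [if_neg hc, if_neg hc]
        apply PySem.Dict.ext
        rw [PySem.Dict.items_insert_of_contains _ _ (hcont.trans hc'),
            PySem.Dict.items_insert_of_contains _ _ hc']
        simp [Ne.symm hex]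
    rw [List.foldl_cons, hstep, ih _ hxr, List.foldl_cons]

-- in a sorted list, nothing equal to the head survives dropWhile (· == head)
theorem not_mem_dropWhile_sorted (xs : List Int) (x : Int)
    (hle : ∀ e ∈ xs, x ≤ e) (hpw : xs.Pairwise (· ≤ ·)) :
    x ∉ xs.dropWhile (· == x) := by
  induction xs with
  | nil => simp
  | cons e es ih =>
    by_cases he : e = x
    · subst he
      rw [List.dropWhile_cons_of_pos (by simp)]
      exact ih (fun z hz => hle z (List.mem_cons_of_mem _ hz)) (List.Pairwise.of_cons hpw)
    · rw [List.dropWhile_cons_of_neg (by simp [he])]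
      intro hmem
      rcases List.mem_cons.1 hmem with h | h
      · exact he h.symm
      · have h1 : x ≤ e := hle e List.mem_cons_self
        have h2 : e ≤ x := (List.pairwise_cons.1 hpw).1 x h
        exact he (le_antisymm h2 h1)

-- counting a grouped (sorted) list gives the run-length pairs
theorem count_items_eq_runs (s : List Int) (hs : s.Pairwise (· ≤ ·)) :
    (s.foldl pvCountStep PySem.Dict.empty).items = pvRuns s := by
  induction s using pvRuns.induct with
  | case1 => simp [pvRuns, PySem.Dict.empty]
  | case2 x xs ih =>
    have hxs : xs.Pairwise (· ≤ ·) := List.Pairwise.of_cons hs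
    have hle : ∀ e ∈ xs, x ≤ e := (List.pairwise_cons.1 hs).1
    have ht : ∀ e ∈ xs.takeWhile (· == x), e = x := by
      intro e he
      simpa using List.mem_takeWhile_imp he
    have hr : (xs.dropWhile (· == x)).Pairwise (· ≤ ·) :=
      hxs.sublist (List.dropWhile_sublist _)
    have hxnr : x ∉ xs.dropWhile (· == x) := not_mem_dropWhile_sorted xs x hle hxs
    have hfirst : pvCountStep PySem.Dict.empty x = PySem.Dict.mk [(x, 1)] := by
      apply PySem.Dict.ext
      simp [pvCountStep, PySem.Dict.items_insert_of_not_contains, PySem.Dict.empty]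
    rw [List.foldl_cons, hfirst, ← List.takeWhile_append_dropWhile (p := (· == x)) (l := xs),
        List.foldl_append, countH _ _ _ ht,
        show PySem.Dict.mk [(x, (1 : Int) + (xs.takeWhile (· == x)).length)] =
          PySem.Dict.mk ((x, (1 : Int) + (xs.takeWhile (· == x)).length) ::
            (PySem.Dict.empty : PySem.Dict Int Int).items) by apply PySem.Dict.ext; simp [PySem.Dict.empty],
        countI _ _ _ _ hxnr]
    rw [pvRuns]
    simp [ih hr]

-- ===== VERDICT (by name: the statement is the Claim_ definition above) =====
theorem Buscar_Repetidos_spec : Claim_equal_Buscar_Repetidos := by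
  intro lista _
  unfold Spec_Buscar_Repetidos Buscar_Repetidos Buscar_Repetidos_alt
  have hsorted : PySem.List.sorted lista (fun x => x) false = pvSelSort lista :=
    PySem.List.sorted_id_eq_of_perm_of_pairwise lista (pvSelSort lista) (pvSelSort_perm lista) (pvSelSort_pairwise lista)
  rw [pvASort_eq, hsorted]
  exact count_items_eq_runs _ (by
    have := PySem.List.sorted_pairwise lista (fun x => x)
    rw [hsorted] at this
    simp [this])
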